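-- pv_equiv track=rewrite | github.com/REDWOLF925/yandex_courses_MySolution | yandexcourses/alg5/4/D.py | linescnt
-- ===== SOURCE A (Python) =====
-- def linescnt(seq, w):
--     ind = 0
--     cnt = 0
--     while ind < len(seq) - 1:
--         l = 1
--         r = len(seq) - ind - 1
--         while l < r:
--             m = (l + r + 1) // 2
--             if seq[ind] - seq[ind + m] + m - 1 <= w:
--                 l = m
--             else:
--                 r = m - 1
--         ind += r
--         cnt += 1
--     return cnt
-- ===== SOURCE B (Python) =====
-- def linescnt(seq, w):
--     # Suffix DP: compute the greedy jump for every start index (recursive bisection),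
--     # then accumulate line counts for all suffixes back-to-front; answer = count for suffix 0.
--     n = len(seq)
--
--     def search(i, lo, hi):
--         if lo >= hi:
--             return hi
--         m = (lo + hi + 1) // 2
--         if seq[i] - seq[i + m] + m - 1 <= w:
--             return search(i, m, hi)
--         return search(i, lo, m - 1)
--
--     jump = [search(i, 1, n - i - 1) for i in range(n - 1)]
--     # rev grows back-to-front: after step k, rev[-1] = line count for the suffix starting at n-1-k
--     rev = [0]
--     for k in range(1, n):
--         i = n - 1 - k
--         rev.append(1 + rev[-jump[i]])
--     return rev[-1]
-- ===== Notes on version B (the rewrite author's own statement) =====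
-- stated objective: alternative
-- what changed: A walks a single greedy path with an inline while-loop bisection per visited index; B is a suffix DP in staged passes: it precomputes the greedy jump for every start index with a recursive bisection, then builds the line counts of all suffixes back-to-front and returns the count for suffix 0.
import Mathlib
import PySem

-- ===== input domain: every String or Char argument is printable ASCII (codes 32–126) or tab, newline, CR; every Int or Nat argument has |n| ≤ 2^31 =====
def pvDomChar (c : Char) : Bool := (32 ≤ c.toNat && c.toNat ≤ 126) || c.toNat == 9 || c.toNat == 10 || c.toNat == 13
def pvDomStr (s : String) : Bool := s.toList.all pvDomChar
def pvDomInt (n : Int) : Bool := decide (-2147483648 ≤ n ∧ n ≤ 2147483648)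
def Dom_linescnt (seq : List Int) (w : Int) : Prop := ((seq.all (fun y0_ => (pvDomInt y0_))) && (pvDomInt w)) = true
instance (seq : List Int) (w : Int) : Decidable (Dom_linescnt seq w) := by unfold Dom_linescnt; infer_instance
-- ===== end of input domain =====

-- B replaces A's single greedy walk (inline while-bisection along one path) by a suffix DP:
-- it precomputes the greedy jump for EVERY start index (recursive bisection), then builds the
-- line counts of all suffixes back-to-front and returns the count for suffix 0 (objective:
-- alternative algorithm, same asymptotic cost).


-- ===== PORT A =====
-- inner 'while l < r' binary-search loop of A; fuel is only a totality guard
-- (each pass shrinks r - l by at least 1, so fuel ≥ r - l never runs out)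
def linescntInner (seq : List Int) (w ind : Int) (fuel : Nat) (l r : Int) : Int :=
  match fuel with
  | 0 => r
  | fuel + 1 =>
    if l < r then
      if PySem.List.pyGetD seq ind 0 - PySem.List.pyGetD seq (ind + PySem.Int.floordiv (l + r + 1) 2) 0
          + PySem.Int.floordiv (l + r + 1) 2 - 1 ≤ w then
        linescntInner seq w ind fuel (PySem.Int.floordiv (l + r + 1) 2) r
      else
        linescntInner seq w ind fuel l (PySem.Int.floordiv (l + r + 1) 2 - 1)
    else r

-- outer 'while ind < len(seq) - 1' loop of A; fuel ≥ len(seq) suffices (ind grows by ≥ 1)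
def linescntOuter (seq : List Int) (w : Int) (fuel : Nat) (ind cnt : Int) : Int :=
  match fuel with
  | 0 => cnt
  | fuel + 1 =>
    if ind < PySem.List.len seq - 1 then
      linescntOuter seq w fuel
        (ind + linescntInner seq w ind seq.length 1 (PySem.List.len seq - ind - 1)) (cnt + 1)
    else cnt

def linescnt (seq : List Int) (w : Int) : Int := linescntOuter seq w seq.length 0 0

-- ===== PORT B =====
-- B's recursive bisection 'search(i, lo, hi)'; fuel is only a totality guard
-- (the interval shrinks every call, so fuel ≥ hi - lo never runs out)
def searchB (seq : List Int) (w : Int) (fuel : Nat) (i lo hi : Int) : Int :=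
  match fuel with
  | 0 => hi
  | fuel + 1 =>
    if lo ≥ hi then hi
    else if PySem.List.pyGetD seq i 0 - PySem.List.pyGetD seq (i + PySem.Int.floordiv (lo + hi + 1) 2) 0
        + PySem.Int.floordiv (lo + hi + 1) 2 - 1 ≤ w then
      searchB seq w fuel i (PySem.Int.floordiv (lo + hi + 1) 2) hi
    else
      searchB seq w fuel i lo (PySem.Int.floordiv (lo + hi + 1) 2 - 1)

-- jump = [search(i, 1, n - i - 1) for i in range(n - 1)]
def jumpsB (seq : List Int) (w : Int) : List Int :=
  (PySem.List.pyRange 0 (PySem.List.len seq - 1) 1).map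
    (fun i => searchB seq w seq.length i 1 (PySem.List.len seq - i - 1))

-- one step of B's back-to-front accumulation: rev.append(1 + rev[-jump[i]]) with i = n - 1 - k.
-- rev is kept NEWEST-FIRST here, so Python's rev[-j] is element j-1 from the head (exact
-- because every access has 1 ≤ j ≤ len(rev), proved below), and append becomes cons.
def revStep (jump : List Int) (n : Int) (acc : List Int) (k : Int) : List Int :=
  (1 + PySem.List.pyGetD acc (PySem.List.pyGetD jump (n - 1 - k) 0 - 1) 0) :: acc

-- 'return rev[-1]': the newest element, i.e. index 0 of the newest-first list
def linescnt_alt (seq : List Int) (w : Int) : Int :=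
  PySem.List.pyGetD
    ((PySem.List.pyRange 1 (PySem.List.len seq) 1).foldl
      (revStep (jumpsB seq w) (PySem.List.len seq)) [0]) 0 0

-- ===== PRECONDITION & SPEC =====
def Spec_linescnt (seq : List Int) (w : Int) (out : Int) : Prop := out = linescnt_alt seq w
instance (seq : List Int) (w : Int) (out : Int) : Decidable (Spec_linescnt seq w out) := by unfold Spec_linescnt; infer_instance

-- ===== CLAIM (what is proved, stated in full; the proofs are below) =====
def Claim_equal_linescnt : Prop := ∀ (seq : List Int) (w : Int), Dom_linescnt seq w → Spec_linescnt seq w (linescnt seq w)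

-- ===== LEMMAS AND PROOFS =====

-- L seq w ind = A's line count for the suffix starting at ind (fuel seq.length suffices)
def Lfun (seq : List Int) (w ind : Int) : Int := linescntOuter seq w seq.length ind 0

-- B's recursive bisection computes exactly A's inner while-loop
theorem searchB_eq_inner (seq : List Int) (w : Int) :
    ∀ (fuel : Nat) (i lo hi : Int), searchB seq w fuel i lo hi = linescntInner seq w i fuel lo hi := by
  intro fuel
  induction fuel with
  | zero => intro i lo hi; rfl
  | succ n ih =>
    intro i lo hi
    unfold searchB linescntInner
    by_cases h : lo < hi
    · rw [if_neg (by omega), if_pos h]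
      split
      · exact ih ..
      · exact ih ..
    · rw [if_pos (by omega), if_neg h]

-- invariant of A's inner loop: its result stays inside [l, r] (any fuel)
theorem linescntInner_bounds (seq : List Int) (w : Int) :
    ∀ (fuel : Nat) (ind l r : Int), l ≤ r →
      l ≤ linescntInner seq w ind fuel l r ∧ linescntInner seq w ind fuel l r ≤ r := by
  intro fuel
  induction fuel with
  | zero => intro ind l r hlr; unfold linescntInner; omega
  | succ n ih =>
    intro ind l r hlr
    unfold linescntInner
    by_cases hlt : l < r
    · have hm := PySem.Int.floordiv_two_mid_bounds (lo := l + 1) (hi := r) (by omega)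
      simp only [show l + 1 + r = l + r + 1 by ring] at hm
      simp only [hlt, if_true]
      split
      · have := ih ind (PySem.Int.floordiv (l + r + 1) 2) r (by omega); omega
      · have := ih ind l (PySem.Int.floordiv (l + r + 1) 2 - 1) (by omega); omega
    · simp [hlt]; omega

-- the counter is a pure accumulator
theorem outer_add (seq : List Int) (w : Int) :
    ∀ (fuel : Nat) (ind cnt : Int),
      linescntOuter seq w fuel ind cnt = cnt + linescntOuter seq w fuel ind 0 := by
  intro fuel
  induction fuel with
  | zero => intro ind cnt; unfold linescntOuter; omega
  | succ n ih =>
    intro ind cnt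
    unfold linescntOuter
    by_cases h : ind < PySem.List.len seq - 1
    · rw [if_pos h, if_pos h, ih _ (cnt + 1), ih _ (0 + 1)]
      omega
    · rw [if_neg h, if_neg h]
      omega

theorem outer_stop (seq : List Int) (w : Int) (fuel : Nat) (ind cnt : Int)
    (h : ¬ ind < (seq.length : Int) - 1) : linescntOuter seq w fuel ind cnt = cnt := by
  cases fuel with
  | zero => rfl
  | succ n => unfold linescntOuter; rw [PySem.List.len_eq, if_neg h]

-- with enough fuel the exact amount does not matter
theorem fuel_irrel (seq : List Int) (w : Int) :
    ∀ (f1 f2 : Nat) (ind : Int), (seq.length : Int) - 1 - ind ≤ (f1 : Int) →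
      (seq.length : Int) - 1 - ind ≤ (f2 : Int) →
      linescntOuter seq w f1 ind 0 = linescntOuter seq w f2 ind 0 := by
  intro f1
  induction f1 with
  | zero =>
    intro f2 ind h1 h2
    have h : ¬ ind < (seq.length : Int) - 1 := by simp at h1; omega
    rw [outer_stop seq w 0 ind 0 h, outer_stop seq w f2 ind 0 h]
  | succ n ih =>
    intro f2 ind h1 h2
    by_cases h : ind < (seq.length : Int) - 1
    · cases f2 with
      | zero => exfalso; simp at h2; omega
      | succ m =>
        have hj := linescntInner_bounds seq w seq.length ind 1 ((seq.length : Int) - ind - 1) (by omega)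
        unfold linescntOuter
        rw [PySem.List.len_eq, if_pos h, if_pos h]
        rw [outer_add seq w n _ (0 + 1), outer_add seq w m _ (0 + 1)]
        rw [ih m _ (by push_cast at h1 ⊢; omega) (by push_cast at h2 ⊢; omega)]
    · rw [outer_stop seq w _ ind 0 h, outer_stop seq w _ ind 0 h]

-- unrolling one iteration of A's outer loop
theorem outer_succ (seq : List Int) (w : Int) (f : Nat) (ind cnt : Int)
    (h : ind < (seq.length : Int) - 1) :
    linescntOuter seq w (f + 1) ind cnt
      = linescntOuter seq w f
          (ind + linescntInner seq w ind seq.length 1 ((seq.length : Int) - ind - 1)) (cnt + 1) := by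
  conv_lhs => unfold linescntOuter
  rw [PySem.List.len_eq, if_pos h]

-- one greedy step of A, phrased on Lfun
theorem L_step (seq : List Int) (w ind : Int) (h0 : 0 ≤ ind) (h : ind < (seq.length : Int) - 1) :
    Lfun seq w ind
      = 1 + Lfun seq w (ind + linescntInner seq w ind seq.length 1 ((seq.length : Int) - ind - 1)) := by
  unfold Lfun
  rw [fuel_irrel seq w seq.length (seq.length + 1) ind (by omega) (by push_cast; omega)]
  rw [outer_succ seq w seq.length ind 0 h]
  rw [outer_add seq w seq.length _ (0 + 1)]
  omega

-- reading B's jump table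
theorem jumps_get (seq : List Int) (w i : Int) (h0 : 0 ≤ i) (h1 : i < (seq.length : Int) - 1) :
    PySem.List.pyGetD (jumpsB seq w) i 0
      = linescntInner seq w i seq.length 1 ((seq.length : Int) - i - 1) := by
  unfold jumpsB
  rw [PySem.List.len_eq]
  rw [PySem.List.pyGetD_map_pyRange_of_nonneg _ _ _ _ h0 h1]
  exact searchB_eq_inner seq w seq.length i 1 _

-- invariant of B's back-to-front accumulation: after k steps the list holds, newest first,
-- the line counts of the suffixes starting at n-1-k, …, n-1
theorem fold_inv (seq : List Int) (w : Int) :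
    ∀ k : Nat, (k : Int) ≤ (seq.length : Int) - 1 →
      (((PySem.List.pyRange 1 ((k : Int) + 1) 1).foldl
          (revStep (jumpsB seq w) (seq.length : Int)) [0]).length = k + 1) ∧
      (∀ t : Nat, t < k + 1 →
        ((PySem.List.pyRange 1 ((k : Int) + 1) 1).foldl
            (revStep (jumpsB seq w) (seq.length : Int)) [0]).getD t 0
          = Lfun seq w ((seq.length : Int) - 1 - (k : Int) + (t : Int))) := by
  intro k
  induction k with
  | zero =>
    intro hk
    rw [PySem.List.pyRange_one_eq_nil (by norm_num)]
    constructor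
    · rfl
    · intro t ht
      have ht0 : t = 0 := by omega
      subst ht0
      have : ¬ ((seq.length : Int) - 1 < (seq.length : Int) - 1) := by omega
      simp [Lfun, outer_stop seq w seq.length _ 0 this]
  | succ k ih =>
    intro hk
    obtain ⟨hlen, hget⟩ := ih (by omega)
    have hsplit : PySem.List.pyRange 1 ((k : Int) + 1 + 1) 1
        = PySem.List.pyRange 1 ((k : Int) + 1) 1 ++ [(k : Int) + 1] := by
      exact_mod_cast PySem.List.pyRange_one_succ_right (a := 1) (b := (k : Int) + 1) (by omega)
    push_cast
    rw [hsplit, List.foldl_append]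
    set acc := (PySem.List.pyRange 1 ((k : Int) + 1) 1).foldl
        (revStep (jumpsB seq w) (seq.length : Int)) [0] with hacc
    set i : Int := (seq.length : Int) - 1 - ((k : Int) + 1) with hi
    have hjv : PySem.List.pyGetD (jumpsB seq w) i 0
        = linescntInner seq w i seq.length 1 ((seq.length : Int) - i - 1) :=
      jumps_get seq w i (by omega) (by omega)
    have hjb := linescntInner_bounds seq w seq.length i 1 ((seq.length : Int) - i - 1) (by omega)
    set j : Int := linescntInner seq w i seq.length 1 ((seq.length : Int) - i - 1) with hj
    have hidx : PySem.List.pyGetD acc (j - 1) 0 = acc.getD (j - 1).toNat 0 := by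
      rw [show j - 1 = (((j - 1).toNat : Nat) : Int) by omega, PySem.List.pyGetD_natCast]
      simp
    have hstep : revStep (jumpsB seq w) (seq.length : Int) acc ((k : Int) + 1)
        = (1 + acc.getD (j - 1).toNat 0) :: acc := by
      unfold revStep
      rw [show (seq.length : Int) - 1 - ((k : Int) + 1) = i by rw [hi], hjv, hidx]
    simp only [List.foldl_cons, List.foldl_nil]
    rw [hstep]
    have hhead : acc.getD (j - 1).toNat 0 = Lfun seq w (i + j) := by
      rw [hget (j - 1).toNat (by omega)]
      congr 1
      omega
    constructor
    · simp [hlen]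
    · intro t ht
      cases t with
      | zero =>
        have hLs := L_step seq w i (by omega) (by omega)
        rw [← hj] at hLs
        simp only [List.getD_cons_zero]
        rw [hhead, ← hLs]
        norm_num
      | succ s =>
        have : ((1 + acc.getD (j - 1).toNat 0) :: acc).getD (s + 1) 0 = acc.getD s 0 := by
          simp [List.getD]
        rw [this, hget s (by omega)]
        congr 1
        push_cast
        ring

-- ===== VERDICT (by name: the statement is the Claim_ definition above) =====
theorem linescnt_spec : Claim_equal_linescnt := by
  unfold Claim_equal_linescnt
  intro seq w _
  unfold Spec_linescnt linescnt linescnt_alt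
  rw [PySem.List.len_eq]
  by_cases hn : seq.length = 0
  · rw [hn]
    rw [show (((0 : Nat) : Int)) = 0 by norm_num]
    rw [PySem.List.pyRange_one_eq_nil (by norm_num)]
    simp [linescntOuter, PySem.List.pyGetD_zero]
  · obtain ⟨hlen, hget⟩ := fold_inv seq w (seq.length - 1) (by omega)
    have hrange : ((seq.length - 1 : Nat) : Int) + 1 = (seq.length : Int) := by omega
    rw [hrange] at hget
    rw [PySem.List.pyGetD_zero, hget 0 (by omega)]
    unfold Lfun
    congr 1
    push_cast
    omega
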